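-- pv_equiv track=rewrite | github.com/oceanefrqt/monotonic_ensemble_model | Module/monotonic_regression_uncertainty.py | compute_Z
-- ===== SOURCE A (Python) =====
-- def compute_Z(A,v):
--     #compute Z by going up the tree from leaf v to the root (Z(g,h) = sum of z_v on the path to the root)
--     Z = A[v-1]
--     while True:
--         if v == 1:
--             break
--         v = v//2
--         Z += A[v-1]
--     return Z
-- ===== SOURCE B (Python) =====
-- def compute_Z(A, v):
--     # path-sum leaf-to-root expressed as the natural recurrence on the parent pointer
--     if v == 1:
--         return A[v-1]
--     return A[v-1] + compute_Z(A, v // 2)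
-- ===== Notes on version B (the rewrite author's own statement) =====
-- stated objective: simpler
-- what changed: Replaces the mutating while-True walk with an accumulator by a direct recursion on the parent pointer v//2, expressing the path-sum as its defining recurrence.
import Mathlib
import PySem

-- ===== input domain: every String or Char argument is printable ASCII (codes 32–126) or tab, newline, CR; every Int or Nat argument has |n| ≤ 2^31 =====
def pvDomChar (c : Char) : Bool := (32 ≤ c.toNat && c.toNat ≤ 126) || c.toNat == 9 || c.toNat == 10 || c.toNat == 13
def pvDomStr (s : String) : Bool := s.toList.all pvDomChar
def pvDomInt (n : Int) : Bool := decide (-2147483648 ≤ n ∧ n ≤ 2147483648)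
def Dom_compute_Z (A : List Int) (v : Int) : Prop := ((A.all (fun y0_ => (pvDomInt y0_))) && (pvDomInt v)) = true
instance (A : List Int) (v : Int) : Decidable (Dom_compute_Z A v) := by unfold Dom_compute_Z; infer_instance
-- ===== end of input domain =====

-- B replaces A's mutating while-True walk by the natural recursion on the parent pointer v // 2 (objective: simpler).


-- ===== PORT A =====
-- the while-True loop: state (v, Z); the '1 < v' test is only the termination guard for
-- inputs where the Python loops forever (v ≤ 0), which Pre_ excludes
def compute_Z_go (A : List Int) (v : Int) (Z : Int) : Int :=
  if _h : 1 < v then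
    compute_Z_go A (PySem.Int.floordiv v 2)
      (Z + (PySem.List.pyGet? A (PySem.Int.floordiv v 2 - 1)).getD 0)
  else Z
termination_by v.toNat
decreasing_by
  simp only [PySem.Int.floordiv_eq_ediv_of_pos (a := v) (by omega : (0:Int) < 2)]
  omega

def compute_Z (A : List Int) (v : Int) : Int :=
  compute_Z_go A v ((PySem.List.pyGet? A (v - 1)).getD 0)

-- ===== PORT B =====
def compute_Z_alt (A : List Int) (v : Int) : Int :=
  if h : v ≤ 1 then (PySem.List.pyGet? A (v - 1)).getD 0
  else (PySem.List.pyGet? A (v - 1)).getD 0 + compute_Z_alt A (PySem.Int.floordiv v 2)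
termination_by v.toNat
decreasing_by
  simp only [PySem.Int.floordiv_eq_ediv_of_pos (a := v) (by omega : (0:Int) < 2)]
  omega

-- ===== PRECONDITION & SPEC =====
-- Pre_: exactly the inputs where A terminates without IndexError: 1 ≤ v (else the loop never
-- reaches v == 1) and v ≤ len(A) (else A[v-1] raises IndexError)
def Pre_compute_Z (A : List Int) (v : Int) : Prop := 1 ≤ v ∧ v ≤ (A.length : Int)
instance (A : List Int) (v : Int) : Decidable (Pre_compute_Z A v) := by unfold Pre_compute_Z; infer_instance
def pvWitness_compute_Z : List Int × Int := ([3, -1, 7], 3)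

def Spec_compute_Z (A : List Int) (v : Int) (out : Int) : Prop := out = compute_Z_alt A v
instance (A : List Int) (v : Int) (out : Int) : Decidable (Spec_compute_Z A v out) := by unfold Spec_compute_Z; infer_instance

-- ===== CLAIM (what is proved, stated in full; the proofs are below) =====
def Claim_equal_compute_Z : Prop := ∀ (A : List Int) (v : Int), Dom_compute_Z A v → Pre_compute_Z A v → Spec_compute_Z A v (compute_Z A v)

-- ===== LEMMAS AND PROOFS =====
lemma go_alt (A : List Int) (n : Nat) :
    ∀ (v : Int), v.toNat = n → 1 ≤ v → ∀ Z : Int,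
      compute_Z_go A v Z + (PySem.List.pyGet? A (v - 1)).getD 0
        = Z + compute_Z_alt A v := by
  induction n using Nat.strong_induction_on with
  | _ n ih =>
    intro v hn hv Z
    by_cases h1 : 1 < v
    · have h2 : PySem.Int.floordiv v 2 = v / 2 :=
        PySem.Int.floordiv_eq_ediv_of_pos (by omega)
      have hv' : 1 ≤ v / 2 := by omega
      have hlt : (v / 2).toNat < n := by omega
      rw [compute_Z_go, compute_Z_alt]
      simp only [dif_pos h1, dif_neg (show ¬ v ≤ 1 by omega), h2]
      have := ih (v / 2).toNat hlt (v / 2) rfl hv'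
        (Z + (PySem.List.pyGet? A (v / 2 - 1)).getD 0)
      linarith
    · have hv1 : v = 1 := by omega
      subst hv1
      rw [compute_Z_go, compute_Z_alt]
      simp

-- ===== VERDICT (by name: the statement is the Claim_ definition above) =====
theorem compute_Z_spec : Claim_equal_compute_Z := by
  intro A v _ hpre
  have := go_alt A v.toNat v rfl hpre.1 ((PySem.List.pyGet? A (v - 1)).getD 0)
  unfold Spec_compute_Z compute_Z
  omega
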